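-- pv_equiv track=rewrite | github.com/Jaiparmar940/me424-robot | ros-py/ros_def/ramses_robot_bridge/ramses_robot_bridge/response_router.py | _parse_pos
-- ===== SOURCE A (Python) =====
-- from typing import Optional, List, Tuple
--
-- def _parse_pos(s: str) -> List[int]:
--     """
--     Parse "POS C1=10 C2=0 C3=-50 C4=10 C5=0 C6=200"
--     Returns a list of 6 ints [C1, C2, C3, C4, C5, C6].
--     """
--     positions = [0] * 6
--     for i in range(1, 7):
--         key = f'C{i}='
--         idx = s.find(key)
--         if idx < 0:
--             continue
--         start = idx + len(key)
--         end   = start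
--         if end < len(s) and s[end] == '-':
--             end += 1
--         while end < len(s) and s[end].isdigit():
--             end += 1
--         try:
--             positions[i - 1] = int(s[start:end])
--         except ValueError:
--             pass
--     return positions
-- ===== SOURCE B (Python) =====
-- def _parse_pos(s):
--     # One left-to-right scan with a pointer, recording the first occurrence of
--     # each 'Cd=' (d in 1..6), instead of six independent find() passes.
--     vals = {}
--     n = len(s)
--     for i in range(n):
--         if s[i] != 'C' or i + 2 >= n or s[i + 2] != '=':
--             continue
--         d = s[i + 1]
--         if d < '1' or d > '6' or d in vals:
--             continue
--         j = i + 3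
--         if j < n and s[j] == '-':
--             j += 1
--         while j < n and s[j].isdigit():
--             j += 1
--         try:
--             vals[d] = int(s[i + 3:j])
--         except ValueError:
--             vals[d] = 0
--     return [vals.get(str(k), 0) for k in range(1, 7)]
-- ===== Notes on version B (the rewrite author's own statement) =====
-- stated objective: alternative
-- what changed: B makes one left-to-right scan over the string, recording in a dict the first occurrence of each of the six keys C1= through C6= as it is met, instead of A's six independent str.find passes each followed by its own digit-run parse.
import Mathlib
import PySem

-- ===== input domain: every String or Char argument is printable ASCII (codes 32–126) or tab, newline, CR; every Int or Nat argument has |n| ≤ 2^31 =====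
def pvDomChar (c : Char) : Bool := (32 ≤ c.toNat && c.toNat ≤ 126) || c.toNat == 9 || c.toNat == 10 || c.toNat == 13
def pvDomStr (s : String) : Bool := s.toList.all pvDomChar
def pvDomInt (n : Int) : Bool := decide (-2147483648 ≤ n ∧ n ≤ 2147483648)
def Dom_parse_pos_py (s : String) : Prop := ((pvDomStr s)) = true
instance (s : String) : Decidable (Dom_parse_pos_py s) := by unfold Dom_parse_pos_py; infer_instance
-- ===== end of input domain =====

-- B replaces A's six independent str.find passes by ONE left-to-right scan that records
-- the first occurrence of each key 'Cd=' (d in 1..6) in a dict; same return value, proved equal.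

-- ===== PORT A =====

-- while end < len(s) and s[end].isdigit(): end += 1   (returns the final `end`)
def pvDigitEnd (cs : List Char) (e : Nat) : Nat :=
  if h : e < cs.length then
    if PySem.Chars.isdigit cs[e] then pvDigitEnd cs (e + 1) else e
  else e
termination_by cs.length - e

-- the body of A's `for i in range(1, 7)` loop (positions is the accumulator)
def pvStepA (cs : List Char) (positions : List Int) (i : Int) : List Int :=
  -- key = f'C{i}=' ; for i in 1..6 the middle character is chr(48 + i)
  let key : List Char := ['C', Char.ofNat (48 + i.toNat), '=']
  let idx := PySem.Chars.find cs key
  if idx < 0 then positions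
  else
    let start := idx.toNat + 3          -- idx + len(key); idx ≥ 0 in this branch
    let e0 := if h : start < cs.length then (if cs[start] = '-' then start + 1 else start) else start
    let e := pvDigitEnd cs e0
    -- try: positions[i-1] = int(s[start:end]) except ValueError: pass
    match PySem.Int.ofChars? (PySem.List.slice cs (some (start : Int)) (some (e : Int))) with
    | some v => positions.set (i - 1).toNat v
    | none => positions

def parse_pos_py (s : String) : List Int :=
  (PySem.List.pyRange 1 7 1).foldl (pvStepA s.toList) [0, 0, 0, 0, 0, 0]

-- ===== PORT B =====

-- t = s[i+3:j] computed from the tail after '=': optional single '-', then the maximal digit run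
def pvSub (t : List Char) : List Char :=
  match t with
  | '-' :: r => '-' :: r.takeWhile PySem.Chars.isdigit
  | _ => t.takeWhile PySem.Chars.isdigit

-- try: int(t) except ValueError: 0
def pvParseVal (t : List Char) : Int :=
  match PySem.Int.ofChars? (pvSub t) with
  | some v => v
  | none => 0

-- B's index tests (s[i] == 'C', i+2 < n, s[i+2] == '=') become the pattern on the suffix at i
def pvStepB (c : Char) (rest : List Char) (vals : PySem.Dict Char Int) : PySem.Dict Char Int :=
  match c, rest with
  | 'C', d :: '=' :: tail =>
      if ('1' ≤ d ∧ d ≤ '6') ∧ vals.contains d = false then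
        vals.insert d (pvParseVal tail)
      else vals
  | _, _ => vals

-- the `for i in range(n)` scan, as structural recursion over the suffix starting at i
def pvScanB : List Char → PySem.Dict Char Int → PySem.Dict Char Int
  | [], vals => vals
  | c :: rest, vals => pvScanB rest (pvStepB c rest vals)

def parse_pos_py_alt (s : String) : List Int :=
  let vals := pvScanB s.toList PySem.Dict.empty
  (PySem.List.pyRange 1 7 1).map (fun k => vals.getD (Char.ofNat (48 + k.toNat)) 0)

-- ===== PRECONDITION & SPEC =====
def Spec_parse_pos_py (s : String) (out : List Int) : Prop := out = parse_pos_py_alt s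
instance (s : String) (out : List Int) : Decidable (Spec_parse_pos_py s out) := by unfold Spec_parse_pos_py; infer_instance

-- ===== CLAIM (what is proved, stated in full; the proofs are below) =====
def Claim_equal_parse_pos_py : Prop := ∀ (s : String), Dom_parse_pos_py s → Spec_parse_pos_py s (parse_pos_py s)

-- ===== LEMMAS AND PROOFS =====

def pvKey (d : Char) : List Char := ['C', d, '=']

-- tail after the FIRST occurrence of 'Cd=' in cs (none if absent): common spec of both ports
def pvFirstTail? (d : Char) : List Char → Option (List Char)
  | [] => none
  | c :: rest => if pvKey d <+: (c :: rest) then some (rest.drop 2) else pvFirstTail? d rest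

-- the value both ports record for digit character d
def pvG (cs : List Char) (d : Char) : Int :=
  match pvFirstTail? d cs with
  | none => 0
  | some t => pvParseVal t

theorem pv_prefix_key_iff (d c : Char) (rest : List Char) :
    pvKey d <+: (c :: rest) ↔ c = 'C' ∧ ∃ tail, rest = d :: '=' :: tail := by
  constructor
  · intro h
    rcases rest with _ | ⟨a, _ | ⟨b, t⟩⟩
    · rw [pvKey, List.cons_prefix_cons] at h
      exact absurd h.2 (by simp)
    · rw [pvKey, List.cons_prefix_cons, List.cons_prefix_cons] at h
      exact absurd h.2.2 (by simp)
    · rw [pvKey, List.cons_prefix_cons, List.cons_prefix_cons, List.cons_prefix_cons] at h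
      obtain ⟨h1, h2, h3, -⟩ := h
      exact ⟨h1.symm, t, by rw [h2, h3]⟩
  · rintro ⟨rfl, tail, rfl⟩
    exact ⟨tail, rfl⟩

theorem pvFirstTail?_eq_none (d : Char) :
    ∀ cs : List Char, (∀ j, ¬ pvKey d <+: cs.drop j) → pvFirstTail? d cs = none := by
  intro cs
  induction cs with
  | nil => intro _; rfl
  | cons c rest ih =>
    intro h
    have h0 := h 0
    simp only [List.drop_zero] at h0
    simp only [pvFirstTail?, if_neg h0]
    exact ih (fun j => h (j + 1))

theorem pvFirstTail?_eq_some (d : Char) :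
    ∀ (cs : List Char) (n : Nat), pvKey d <+: cs.drop n → (∀ i < n, ¬ pvKey d <+: cs.drop i) →
      pvFirstTail? d cs = some (cs.drop (n + 3)) := by
  intro cs
  induction cs with
  | nil =>
    intro n hpre _
    simp [pvKey] at hpre
  | cons c rest ih =>
    intro n hpre hmin
    cases n with
    | zero =>
      simp only [List.drop_zero] at hpre
      simp [pvFirstTail?, if_pos hpre]
    | succ m =>
      have h0 : ¬ pvKey d <+: (c :: rest) := by
        have := hmin 0 (Nat.succ_pos m); simpa using this
      simp only [pvFirstTail?, if_neg h0]
      have hpre' : pvKey d <+: rest.drop m := by simpa using hpre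
      have hmin' : ∀ i < m, ¬ pvKey d <+: rest.drop i := by
        intro i hi
        have := hmin (i + 1) (by omega)
        simpa using this
      simpa [List.drop_succ_cons] using ih m hpre' hmin'

-- pvFirstTail? against Python's str.find
theorem pvFirstTail?_eq_find (d : Char) (cs : List Char) :
    pvFirstTail? d cs =
      (if PySem.Chars.find cs (pvKey d) = -1 then none
       else some (cs.drop ((PySem.Chars.find cs (pvKey d)).toNat + 3))) := by
  by_cases h : PySem.Chars.find cs (pvKey d) = -1
  · rw [if_pos h]
    apply pvFirstTail?_eq_none
    intro j hj
    have hinf : pvKey d <:+: cs := hj.isInfix.trans (cs.drop_suffix j).isInfix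
    exact ((PySem.Chars.find_eq_neg_one_iff cs (pvKey d)).mp h) hinf
  · rw [if_neg h]
    have hge : (0 : Int) ≤ PySem.Chars.find cs (pvKey d) := by
      have := PySem.Chars.neg_one_le_find cs (pvKey d); omega
    obtain ⟨hpre, hmin⟩ := PySem.Chars.find_spec (s := cs) (sub := pvKey d) hge
    exact pvFirstTail?_eq_some d cs _ hpre hmin

-- ----- A side -----

theorem pvDigitEnd_eq (cs : List Char) : ∀ e : Nat,
    pvDigitEnd cs e = e + ((cs.drop e).takeWhile PySem.Chars.isdigit).length := by
  intro e
  fun_induction pvDigitEnd cs e with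
  | case1 e h hd ih =>
    rw [ih, List.drop_eq_getElem_cons h, List.takeWhile_cons_of_pos hd]
    simp; omega
  | case2 e h hd =>
    rw [List.drop_eq_getElem_cons h, List.takeWhile_cons_of_neg hd]
    simp
  | case3 e h =>
    rw [List.drop_eq_nil_iff.mpr (by omega)]
    simp

theorem pv_take_takeWhile {p : Char → Bool} (r : List Char) :
    r.take ((r.takeWhile p).length) = r.takeWhile p :=
  (List.prefix_iff_eq_take.mp (List.takeWhile_prefix p)).symm

-- A's index-based minus/digit-run slice equals B's structural pvSub of the tail
theorem pvSub_cons_ne (c : Char) (r : List Char) (hc : c ≠ '-') :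
    pvSub (c :: r) = (c :: r).takeWhile PySem.Chars.isdigit := by
  unfold pvSub
  split
  · rename_i heq
    injection heq with h1 _
    exact absurd h1 hc
  · rfl

-- A's index-based minus/digit-run slice equals B's structural pvSub of the tail
theorem pvSub_eq (cs : List Char) (start : Nat) :
    (cs.drop start).take
        (pvDigitEnd cs
          (if h : start < cs.length then (if cs[start] = '-' then start + 1 else start) else start)
          - start)
      = pvSub (cs.drop start) := by
  by_cases h : start < cs.length
  · rw [dif_pos h]
    have hdrop : cs.drop start = cs[start] :: cs.drop (start + 1) := List.drop_eq_getElem_cons h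
    by_cases hm : cs[start] = '-'
    · rw [if_pos hm, pvDigitEnd_eq, hdrop, hm]
      have harith : start + 1 + ((cs.drop (start + 1)).takeWhile PySem.Chars.isdigit).length - start
          = ((cs.drop (start + 1)).takeWhile PySem.Chars.isdigit).length + 1 := by omega
      rw [harith, List.take_succ_cons, pv_take_takeWhile, pvSub]
    · rw [if_neg hm, pvDigitEnd_eq, Nat.add_sub_cancel_left, hdrop, pv_take_takeWhile,
        pvSub_cons_ne _ _ hm]
  · rw [dif_neg h]
    have hnil : cs.drop start = [] := List.drop_eq_nil_iff.mpr (by omega)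
    rw [hnil]
    have hde : pvDigitEnd cs start = start := by
      rw [pvDigitEnd_eq, hnil]; simp
    rw [hde]
    simp [pvSub]

-- positions.set k 0 is the identity when slot k is still 0
theorem pv_set_zero (l : List Int) (k : Nat) (h : l.getD k 0 = 0) : l.set k 0 = l := by
  apply List.ext_getElem?
  intro n
  rw [List.getElem?_set]
  by_cases hk : k = n
  · subst hk
    by_cases hl : k < l.length
    · rw [if_pos rfl, if_pos hl]
      rw [List.getD_eq_getElem?_getD, List.getElem?_eq_getElem hl] at h
      rw [List.getElem?_eq_getElem hl]
      simp at h ⊢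
      omega
    · rw [if_pos rfl, if_neg hl, List.getElem?_eq_none (by omega)]
  · rw [if_neg hk]

-- one iteration of A's loop, written through pvG
theorem pvStepA_eq (cs : List Char) (i : Int) (positions : List Int)
    (hp : positions.getD (i - 1).toNat 0 = 0) :
    pvStepA cs positions i
      = positions.set (i - 1).toNat (pvG cs (Char.ofNat (48 + i.toNat))) := by
  set d := Char.ofNat (48 + i.toNat) with hd
  have hkey : (['C', d, '='] : List Char) = pvKey d := rfl
  unfold pvStepA pvG
  dsimp only
  rw [pvFirstTail?_eq_find, hkey]
  by_cases h : PySem.Chars.find cs (pvKey d) = -1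
  · have hlt : PySem.Chars.find cs (pvKey d) < 0 := by omega
    rw [if_pos hlt, if_pos h]
    exact (pv_set_zero positions _ hp).symm
  · have hge : (0 : Int) ≤ PySem.Chars.find cs (pvKey d) := by
      have := PySem.Chars.neg_one_le_find cs (pvKey d); omega
    rw [if_neg (by omega), if_neg h]
    rw [PySem.List.slice_natCast, pvSub_eq]
    cases hoc : PySem.Int.ofChars? (pvSub (cs.drop ((PySem.Chars.find cs (pvKey d)).toNat + 3))) with
    | some v => simp only [hoc, pvParseVal]
    | none =>
      simp only [hoc, pvParseVal]
      exact (pv_set_zero positions _ hp).symm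

theorem pv_A_eq (cs : List Char) :
    (PySem.List.pyRange 1 7 1).foldl (pvStepA cs) [0, 0, 0, 0, 0, 0]
      = [pvG cs '1', pvG cs '2', pvG cs '3', pvG cs '4', pvG cs '5', pvG cs '6'] := by
  have hr : PySem.List.pyRange 1 7 1 = [1, 2, 3, 4, 5, 6] := by decide
  have h1 : pvStepA cs [0, 0, 0, 0, 0, 0] 1 = [pvG cs '1', 0, 0, 0, 0, 0] := by
    rw [pvStepA_eq cs 1 _ (by decide), show ((1 : Int) - 1).toNat = 0 from by decide,
      show Char.ofNat (48 + (1 : Int).toNat) = '1' from by decide]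
    rfl
  have h2 : pvStepA cs [pvG cs '1', 0, 0, 0, 0, 0] 2 = [pvG cs '1', pvG cs '2', 0, 0, 0, 0] := by
    rw [pvStepA_eq cs 2 _ (by rfl), show ((2 : Int) - 1).toNat = 1 from by decide,
      show Char.ofNat (48 + (2 : Int).toNat) = '2' from by decide]
    rfl
  have h3 : pvStepA cs [pvG cs '1', pvG cs '2', 0, 0, 0, 0] 3
      = [pvG cs '1', pvG cs '2', pvG cs '3', 0, 0, 0] := by
    rw [pvStepA_eq cs 3 _ (by rfl), show ((3 : Int) - 1).toNat = 2 from by decide,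
      show Char.ofNat (48 + (3 : Int).toNat) = '3' from by decide]
    rfl
  have h4 : pvStepA cs [pvG cs '1', pvG cs '2', pvG cs '3', 0, 0, 0] 4
      = [pvG cs '1', pvG cs '2', pvG cs '3', pvG cs '4', 0, 0] := by
    rw [pvStepA_eq cs 4 _ (by rfl), show ((4 : Int) - 1).toNat = 3 from by decide,
      show Char.ofNat (48 + (4 : Int).toNat) = '4' from by decide]
    rfl
  have h5 : pvStepA cs [pvG cs '1', pvG cs '2', pvG cs '3', pvG cs '4', 0, 0] 5
      = [pvG cs '1', pvG cs '2', pvG cs '3', pvG cs '4', pvG cs '5', 0] := by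
    rw [pvStepA_eq cs 5 _ (by rfl), show ((5 : Int) - 1).toNat = 4 from by decide,
      show Char.ofNat (48 + (5 : Int).toNat) = '5' from by decide]
    rfl
  have h6 : pvStepA cs [pvG cs '1', pvG cs '2', pvG cs '3', pvG cs '4', pvG cs '5', 0] 6
      = [pvG cs '1', pvG cs '2', pvG cs '3', pvG cs '4', pvG cs '5', pvG cs '6'] := by
    rw [pvStepA_eq cs 6 _ (by rfl), show ((6 : Int) - 1).toNat = 5 from by decide,
      show Char.ofNat (48 + (6 : Int).toNat) = '6' from by decide]
    rfl
  rw [hr]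
  simp only [List.foldl_cons, List.foldl_nil]
  rw [h1, h2, h3, h4, h5, h6]

-- ----- B side -----

theorem pvStepB_get?_of_not_prefix (c : Char) (rest : List Char) (vals : PySem.Dict Char Int)
    (d : Char) (hp : ¬ pvKey d <+: (c :: rest)) :
    (pvStepB c rest vals).get? d = vals.get? d := by
  unfold pvStepB
  split
  · rename_i d' tail
    split
    · apply PySem.Dict.get?_insert_of_ne
      intro hdd
      subst hdd
      exact hp ((pv_prefix_key_iff d 'C' (d :: '=' :: tail)).mpr ⟨rfl, tail, rfl⟩)
    · rfl
  · rfl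

theorem pvScanB_get? (d : Char) (h1 : '1' ≤ d) (h6 : d ≤ '6') :
    ∀ (cs : List Char) (vals : PySem.Dict Char Int),
      (pvScanB cs vals).get? d = (vals.get? d).or ((pvFirstTail? d cs).map pvParseVal) := by
  intro cs
  induction cs with
  | nil =>
    intro vals
    simp [pvScanB, pvFirstTail?]
  | cons c rest ih =>
    intro vals
    rw [pvScanB, ih]
    by_cases hp : pvKey d <+: (c :: rest)
    · obtain ⟨rfl, tail, rfl⟩ := (pv_prefix_key_iff d c rest).mp hp
      have hft : pvFirstTail? d ('C' :: d :: '=' :: tail) = some tail := by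
        simp only [pvFirstTail?, if_pos hp]
        rfl
      rw [hft]
      by_cases hcont : vals.contains d = true
      · have hsome : vals.get? d ≠ none := by
          intro hv
          rw [PySem.Dict.get?_eq_none_iff_contains, hcont] at hv
          exact absurd hv (by decide)
        have hstep : pvStepB 'C' (d :: '=' :: tail) vals = vals := by
          unfold pvStepB
          simp [hcont]
        rw [hstep]
        cases hv : vals.get? d with
        | none => exact absurd hv hsome
        | some v => simp
      · have hnone : vals.get? d = none :=
          (PySem.Dict.get?_eq_none_iff_contains vals d).mpr (by simpa using hcont)
        have hstep : pvStepB 'C' (d :: '=' :: tail) vals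
            = vals.insert d (pvParseVal tail) := by
          unfold pvStepB
          simp [hcont, h1, h6]
        rw [hstep, PySem.Dict.get?_insert_self, hnone]
        simp
    · rw [pvFirstTail?, if_neg hp]
      rw [pvStepB_get?_of_not_prefix c rest vals d hp]

theorem pv_B_eq (cs : List Char) :
    (PySem.List.pyRange 1 7 1).map (fun k => (pvScanB cs PySem.Dict.empty).getD (Char.ofNat (48 + k.toNat)) 0)
      = [pvG cs '1', pvG cs '2', pvG cs '3', pvG cs '4', pvG cs '5', pvG cs '6'] := by
  have hr : PySem.List.pyRange 1 7 1 = [1, 2, 3, 4, 5, 6] := by decide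
  rw [hr]
  simp only [List.map_cons, List.map_nil]
  have hcomp : ∀ d : Char, '1' ≤ d → d ≤ '6' →
      (pvScanB cs PySem.Dict.empty).getD d 0 = pvG cs d := by
    intro d h1 h6
    rw [PySem.Dict.getD_eq_get?_getD, pvScanB_get? d h1 h6, PySem.Dict.get?_empty,
      Option.none_or, pvG]
    cases pvFirstTail? d cs <;> simp
  rw [show Char.ofNat (48 + (1 : Int).toNat) = '1' from by decide,
    show Char.ofNat (48 + (2 : Int).toNat) = '2' from by decide,
    show Char.ofNat (48 + (3 : Int).toNat) = '3' from by decide,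
    show Char.ofNat (48 + (4 : Int).toNat) = '4' from by decide,
    show Char.ofNat (48 + (5 : Int).toNat) = '5' from by decide,
    show Char.ofNat (48 + (6 : Int).toNat) = '6' from by decide,
    hcomp '1' (by decide) (by decide), hcomp '2' (by decide) (by decide),
    hcomp '3' (by decide) (by decide), hcomp '4' (by decide) (by decide),
    hcomp '5' (by decide) (by decide), hcomp '6' (by decide) (by decide)]

-- ===== VERDICT (by name: the statement is the Claim_ definition above) =====
theorem parse_pos_py_spec : Claim_equal_parse_pos_py := by
  intro s _
  unfold Spec_parse_pos_py parse_pos_py parse_pos_py_alt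
  rw [pv_A_eq, pv_B_eq]
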